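-- pv_equiv track=rewrite | github.com/alexebaker/decision-trees | decision_tree/id3.py | dna_count_class
-- ===== SOURCE A (Python) =====
-- def dna_count_class(dna_data):
--     """counts the number of each class and returns them in this order - ei, ie
--     and n.
--
--     :type dna_data: dict
--     :param dna_data: Set of parsed dna data.
--
--     :rtype: tuple
--     :returns: A tuple of the counts for (EI, IE, N)
--     """
--     ei_count = 0
--     ie_count = 0
--     n_count = 0
--     for dna in dna_data:
--         if dna['class'] == 'IE':
--             ie_count += 1
--         elif dna['class'] == 'EI':
--             ei_count += 1
--         else:
--             n_count += 1
--     return (ei_count, ie_count, n_count)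
-- ===== SOURCE B (Python) =====
-- def dna_count_class(dna_data):
--     """Extract the class column once, then use staged list.count passes;
--     N is derived by subtraction, not counted."""
--     classes = [dna['class'] for dna in dna_data]
--     ei = classes.count('EI')
--     ie = classes.count('IE')
--     return (ei, ie, len(dna_data) - ei - ie)
-- ===== Notes on version B (the rewrite author's own statement) =====
-- stated objective: simpler
-- what changed: B projects the class column once and counts 'EI' and 'IE' with staged list.count passes, deriving the N count by subtraction from the list length, instead of A's single pass with three running counters and a three-way if/elif/else branch.
import Mathlib
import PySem

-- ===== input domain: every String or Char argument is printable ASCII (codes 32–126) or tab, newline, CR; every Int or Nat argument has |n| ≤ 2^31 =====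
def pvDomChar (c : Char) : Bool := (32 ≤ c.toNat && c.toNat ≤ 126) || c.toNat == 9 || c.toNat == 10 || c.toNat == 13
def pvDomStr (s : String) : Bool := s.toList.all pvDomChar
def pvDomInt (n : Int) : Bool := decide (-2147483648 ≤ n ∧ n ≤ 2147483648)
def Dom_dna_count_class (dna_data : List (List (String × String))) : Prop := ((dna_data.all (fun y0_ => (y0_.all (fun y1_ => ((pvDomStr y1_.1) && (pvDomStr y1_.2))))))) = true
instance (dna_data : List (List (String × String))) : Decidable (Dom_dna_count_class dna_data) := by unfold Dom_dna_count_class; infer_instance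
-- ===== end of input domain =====

-- B projects the class column once and uses staged list.count passes with N derived by
-- subtraction, instead of A's three running counters with a three-way branch (objective: simpler).


-- ===== PORT A =====
-- literal port of A: a fold carrying the three counters; Python's dna['class'] raises KeyError
-- when the key is missing (lookup = none), so Pre_ excludes that; the none branch leaves state unchanged.
def dna_count_class (dna_data : List (List (String × String))) : Int × Int × Int :=
  let s := dna_data.foldl (fun s dna =>
    match dna.lookup "class" with
    | some c =>
        if c = "IE" then (s.1, s.2.1 + 1, s.2.2)
        else if c = "EI" then (s.1 + 1, s.2.1, s.2.2)
        else (s.1, s.2.1, s.2.2 + 1)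
    | none => s) ((0 : Int), (0 : Int), (0 : Int))
  (s.1, s.2.1, s.2.2)

-- ===== PORT B =====
-- literal port of Source B: project the class column (as Options; none = KeyError, outside Pre_),
-- then count 'EI' and 'IE' with List.count and derive N by subtraction from the length.
def dna_count_class_alt (dna_data : List (List (String × String))) : Int × Int × Int :=
  let classes := dna_data.map (fun dna => dna.lookup "class")
  let ei : Int := classes.count (some "EI")
  let ie : Int := classes.count (some "IE")
  (ei, ie, (dna_data.length : Int) - ei - ie)

-- ===== PRECONDITION & SPEC =====
-- Pre_ excludes exactly the records without a 'class' key, on which Python A raises KeyError.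
def Pre_dna_count_class (dna_data : List (List (String × String))) : Prop :=
  (dna_data.all (fun dna => (dna.lookup "class").isSome)) = true
instance (dna_data : List (List (String × String))) : Decidable (Pre_dna_count_class dna_data) := by unfold Pre_dna_count_class; infer_instance

def pvWitness_dna_count_class : (List (List (String × String))) :=
  [[("class", "EI")], [("class", "N")], [("class", "IE")]]

def Spec_dna_count_class (dna_data : List (List (String × String))) (out : Int × Int × Int) : Prop := out = dna_count_class_alt dna_data
instance (dna_data : List (List (String × String))) (out : Int × Int × Int) : Decidable (Spec_dna_count_class dna_data out) := by unfold Spec_dna_count_class; infer_instance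

-- ===== CLAIM (what is proved, stated in full; the proofs are below) =====
def Claim_equal_dna_count_class : Prop := ∀ (dna_data : List (List (String × String))), Dom_dna_count_class dna_data → Pre_dna_count_class dna_data → Spec_dna_count_class dna_data (dna_count_class dna_data)

-- ===== LEMMAS AND PROOFS =====

-- A's fold, under Pre_: the accumulators collect exactly the two counts and the remainder.
theorem a_fold_eq (l : List (List (String × String))) (e i n : Int)
    (hpre : ∀ rec ∈ l, (rec.lookup "class").isSome = true) :
    (l.foldl (fun s dna =>
      match dna.lookup "class" with
      | some c =>
          if c = "IE" then (s.1, s.2.1 + 1, s.2.2)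
          else if c = "EI" then (s.1 + 1, s.2.1, s.2.2)
          else (s.1, s.2.1, s.2.2 + 1)
      | none => s) (e, i, n))
    = (e + (l.countP (fun dna => dna.lookup "class" == some "EI") : Int),
       i + (l.countP (fun dna => dna.lookup "class" == some "IE") : Int),
       n + ((l.length : Int)
            - (l.countP (fun dna => dna.lookup "class" == some "EI") : Int)
            - (l.countP (fun dna => dna.lookup "class" == some "IE") : Int))) := by
  induction l generalizing e i n with
  | nil => simp
  | cons rec rest ih =>
    have hsome : (rec.lookup "class").isSome = true := hpre rec (by simp)
    have hrest : ∀ r ∈ rest, (r.lookup "class").isSome = true :=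
      fun r hr => hpre r (by simp [hr])
    cases h : rec.lookup "class" with
    | none => rw [h] at hsome; simp at hsome
    | some x =>
      rw [List.foldl_cons, List.countP_cons, List.countP_cons, List.length_cons]
      simp only [h]
      by_cases hIE : x = "IE"
      · subst hIE
        rw [if_pos rfl, ih _ _ _ hrest]
        simp [Prod.ext_iff]
        omega
      · by_cases hEI : x = "EI"
        · subst hEI
          rw [if_neg hIE, if_pos rfl, ih _ _ _ hrest]
          simp [Prod.ext_iff]
          omega
        · rw [if_neg hIE, if_neg hEI, ih _ _ _ hrest]
          have h1 : (some x == some "EI") = false := by simp [hEI]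
          have h2 : (some x == some "IE") = false := by simp [hIE]
          rw [h1, h2]
          simp [Prod.ext_iff]
          omega

-- B's staged counts on the projected column equal countP on the original list.
theorem alt_count_eq (l : List (List (String × String))) (c : String) :
    (l.map (fun dna => dna.lookup "class")).count (some c)
      = l.countP (fun dna => dna.lookup "class" == some c) := by
  rw [List.count_eq_countP, List.countP_map]
  rfl

-- ===== VERDICT (by name: the statement is the Claim_ definition above) =====
theorem dna_count_class_spec : Claim_equal_dna_count_class := by
  intro dna_data _ hpre
  unfold Pre_dna_count_class at hpre
  rw [List.all_eq_true] at hpre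
  show dna_count_class dna_data = dna_count_class_alt dna_data
  unfold dna_count_class dna_count_class_alt
  rw [a_fold_eq _ _ _ _ (fun r hr => by simpa using hpre r hr)]
  simp only [alt_count_eq]
  simp
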